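-- pv_equiv track=rewrite | github.com/ootomonaiso/2024_program | main.py | read_huffman_codes
-- ===== SOURCE A (Python) =====
-- def read_huffman_codes(lines):
--     # 辞書と文字列の初期化
--     huffman_codes = {}
--     compressed_data = ""
--     # 読み取り中フラグの初期化
--     reading_compressed_data = False
--
--     # 各行へ処理をあてる
--     for line in lines:
--         # 読み取り中ではない場合
--         if not reading_compressed_data:
--             # 空行があったら読み取り開始
--             if line.strip() == "":
--                 reading_compressed_data = True
--             else:
--                 # 対応する文字とコードを抽出し辞書へ
--                 char, code = line.strip().split(': ')
--                 huffman_codes[code] = char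
--         # 読み取り中ならば
--         elif reading_compressed_data:
--             # 行から圧縮データを抽出し文字列へ
--             compressed_data += line.strip()
--
--     # 読み取ったコードとデータを返す
--     return huffman_codes, compressed_data
-- ===== SOURCE B (Python) =====
-- def read_huffman_codes(lines):
--     stripped = [line.strip() for line in lines]
--     if "" in stripped:
--         idx = stripped.index("")
--     else:
--         idx = len(stripped)
--     huffman_codes = {}
--     for entry in stripped[:idx]:
--         char, code = entry.split(': ')
--         huffman_codes[code] = char
--     compressed_data = "".join(stripped[idx + 1:])
--     return huffman_codes, compressed_data
-- ===== Notes on version B (the rewrite author's own statement) =====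
-- stated objective: simpler
-- what changed: Replaces the single stateful flag-driven pass with a separator-first decomposition: locate the first blank stripped line, build the dict from the slice before it and join the slice after it.
import Mathlib
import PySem

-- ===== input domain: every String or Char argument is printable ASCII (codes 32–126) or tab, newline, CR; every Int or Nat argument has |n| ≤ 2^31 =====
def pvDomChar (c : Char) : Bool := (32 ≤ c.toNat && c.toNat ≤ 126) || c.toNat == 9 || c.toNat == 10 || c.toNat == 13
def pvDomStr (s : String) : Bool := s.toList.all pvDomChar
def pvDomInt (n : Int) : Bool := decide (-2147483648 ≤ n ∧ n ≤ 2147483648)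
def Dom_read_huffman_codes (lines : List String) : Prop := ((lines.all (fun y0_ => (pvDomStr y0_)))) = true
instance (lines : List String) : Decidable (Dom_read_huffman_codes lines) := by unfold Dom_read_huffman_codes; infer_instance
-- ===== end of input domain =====

-- B replaces A's single stateful flag-driven pass by a separator-first decomposition (find the
-- first blank stripped line, parse the slice before it, join the slice after it): simpler.

-- ===== PORT A =====
-- A's loop body: state (dict, accumulated data, reading flag).
def pvStepA (st : PySem.Dict String String × String × Bool) (line : String) :
    PySem.Dict String String × String × Bool :=
  if st.2.2 = false then
    if PySem.Str.strip line == "" then (st.1, st.2.1, true)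
    else
      match PySem.Str.split? (PySem.Str.strip line) ": " with
      | some [ch, code] => (st.1.insert code ch, st.2.1, st.2.2)
      | _ => st   -- Python raises ValueError here; excluded by Pre_
  else (st.1, st.2.1 ++ PySem.Str.strip line, st.2.2)

def read_huffman_codes (lines : List String) : (List (String × String)) × String :=
  let st := lines.foldl pvStepA (PySem.Dict.empty, "", false)
  (st.1.items, st.2.1)

-- ===== PORT B =====
-- B's dict-building loop body over the stripped header slice.
def pvInsB (d : PySem.Dict String String) (entry : String) : PySem.Dict String String :=
  match PySem.Str.split? entry ": " with
  | some [ch, code] => d.insert code ch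
  | _ => d          -- Python raises ValueError here; excluded by Pre_

def read_huffman_codes_alt (lines : List String) : (List (String × String)) × String :=
  let stripped := lines.map PySem.Str.strip
  let idx : Nat := if "" ∈ stripped then (PySem.List.index? stripped "").getD 0
                   else stripped.length
  let hc := (PySem.List.slice stripped none (some (idx : Int))).foldl pvInsB PySem.Dict.empty
  (hc.items, PySem.Str.join "" (PySem.List.slice stripped (some ((idx : Int) + 1)) none))

-- ===== PRECONDITION & SPEC =====
-- Pre_ excludes exactly the inputs on which A raises ValueError: some line before the first
-- blank-stripped line whose stripped form does not split on ': ' into exactly two pieces.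
def Pre_read_huffman_codes (lines : List String) : Prop :=
  ∀ l ∈ (lines.map PySem.Str.strip).takeWhile (fun s => !(s == "")),
    ((PySem.Str.split? l ": ").getD []).length = 2
instance (lines : List String) : Decidable (Pre_read_huffman_codes lines) := by
  unfold Pre_read_huffman_codes; infer_instance
def pvWitness_read_huffman_codes : List String := ["a: 0", "b: 10", "", "0110", "10"]
def Spec_read_huffman_codes (lines : List String) (out : (List (String × String)) × String) : Prop := out = read_huffman_codes_alt lines
instance (lines : List String) (out : (List (String × String)) × String) : Decidable (Spec_read_huffman_codes lines out) := by unfold Spec_read_huffman_codes; infer_instance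

-- ===== CLAIM (what is proved, stated in full; the proofs are below) =====
def Claim_equal_read_huffman_codes : Prop := ∀ (lines : List String), Dom_read_huffman_codes lines → Pre_read_huffman_codes lines → Spec_read_huffman_codes lines (read_huffman_codes lines)

-- ===== LEMMAS AND PROOFS =====

-- String concatenation fold, used to characterise both A's phase-2 accumulation and B's join.
def pvCat (ls : List String) : String := ls.foldl (fun acc l => acc ++ l) ""

lemma pvCat_cons (l : String) (ls : List String) : pvCat (l :: ls) = l ++ pvCat ls := by
  have key : ∀ (ls : List String) (a b : String),
      ls.foldl (fun acc l => acc ++ l) (a ++ b) = a ++ ls.foldl (fun acc l => acc ++ l) b := by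
    intro ls
    induction ls with
    | nil => intro a b; rfl
    | cons x xs ih => intro a b; simp only [List.foldl_cons, String.append_assoc, ih]
  simpa [pvCat] using key ls l ""

lemma pvJoin_eq_pvCat (ls : List String) : PySem.Str.join "" ls = pvCat ls := by
  induction ls with
  | nil =>
    apply String.ext
    simp [PySem.Str.toList_join, PySem.Chars.join_nil, pvCat]
  | cons l ls ih =>
    apply String.ext
    rw [pvCat_cons, ← ih]
    cases ls with
    | nil => simp [PySem.Str.toList_join, PySem.Chars.join_singleton, PySem.Chars.join_nil]
    | cons m ms =>
      simp [PySem.Str.toList_join, PySem.Chars.join_cons_cons]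

-- A's phase 2 (flag already true) just concatenates the stripped lines.
lemma pvPhase2 (ls : List String) :
    ∀ (d : PySem.Dict String String) (cd : String),
      ls.foldl pvStepA (d, cd, true) = (d, cd ++ pvCat (ls.map PySem.Str.strip), true) := by
  induction ls with
  | nil => intro d cd; simp [pvCat]
  | cons l ls ih =>
    intro d cd
    have hstep : pvStepA (d, cd, true) l = (d, cd ++ PySem.Str.strip l, true) := by
      simp [pvStepA]
    rw [List.foldl_cons, hstep, ih, List.map_cons, pvCat_cons, String.append_assoc]

-- A's step on a non-blank line in phase 1 is B's dict step.
lemma pvStepA_nonblank (d : PySem.Dict String String) (cd : String) (l : String)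
    (h : ¬ (PySem.Str.strip l == "") = true) :
    pvStepA (d, cd, false) l = (pvInsB d (PySem.Str.strip l), cd, false) := by
  simp only [pvStepA, pvInsB, h]

  cases hs : PySem.Str.split? (PySem.Str.strip l) ": " with
  | none => rfl
  | some parts =>
    match parts with
    | [] => rfl
    | [x] => rfl
    | [x, y] => rfl
    | x :: y :: z :: rest => rfl

-- The main invariant: A's full fold, from an arbitrary phase-1 dict, equals B's decomposition.
lemma pvMain (lines : List String) :
    ∀ (d : PySem.Dict String String),
      lines.foldl pvStepA (d, "", false)
        = (((lines.map PySem.Str.strip).take ((lines.map PySem.Str.strip).idxOf "")).foldl pvInsB d,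
           pvCat ((lines.map PySem.Str.strip).drop ((lines.map PySem.Str.strip).idxOf "" + 1)),
           decide ("" ∈ lines.map PySem.Str.strip)) := by
  induction lines with
  | nil => intro d; simp [pvCat]
  | cons l ls ih =>
    intro d
    by_cases hb : (PySem.Str.strip l == "") = true
    · have hb' : PySem.Str.strip l = "" := by simpa using hb
      simp only [List.foldl_cons, pvStepA, if_true, List.map_cons, hb',
        List.idxOf_cons, beq_self_eq_true, cond_true, List.take_zero, List.foldl_nil,
        Nat.zero_add, List.drop_one, List.tail_cons, List.mem_cons]
      rw [pvPhase2]
      simp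
    · have hb' : ¬ PySem.Str.strip l = "" := by simpa using hb
      simp only [List.foldl_cons]
      rw [pvStepA_nonblank d "" l hb, ih]
      simp [hb', List.take_succ_cons, List.drop_succ_cons]

-- B's idx expression is idxOf on the stripped list.
lemma pvIdx_eq (s : List String) :
    (if "" ∈ s then (PySem.List.index? s "").getD 0 else s.length) = s.idxOf "" := by
  by_cases h : "" ∈ s
  · have : List.idxOf? "" s = some (s.idxOf "") := by
      induction s with
      | nil => simp at h
      | cons x xs ihx =>
        by_cases hx : x = ""
        · subst hx; simp [List.idxOf?_cons]
        · have hm : "" ∈ xs := by simpa [hx] using h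
          simp [List.idxOf?_cons, hx, ihx hm]
    simp [h, PySem.List.index?_eq_idxOf?, this]
  · rw [if_neg h, ((List.idxOf_eq_length_iff).mpr h)]

lemma pvDrop_min (n : Nat) (s : List String) : s.drop (min n s.length) = s.drop n := by
  by_cases h : n ≤ s.length
  · rw [Nat.min_eq_left h]
  · rw [Nat.min_eq_right (le_of_lt (lt_of_not_ge h)), List.drop_length,
      List.drop_eq_nil_of_le (le_of_lt (lt_of_not_ge h))]

-- ===== VERDICT (by name: the statement is the Claim_ definition above) =====
theorem read_huffman_codes_spec : Claim_equal_read_huffman_codes := by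
  unfold Claim_equal_read_huffman_codes Spec_read_huffman_codes
  intro lines _ _
  unfold read_huffman_codes read_huffman_codes_alt
  rw [pvMain lines PySem.Dict.empty]
  simp only [pvIdx_eq]
  set s := lines.map PySem.Str.strip with hs
  set i := s.idxOf "" with hi
  have hslice1 : PySem.List.slice s none (some (i : Int)) = s.take i := by
    rw [PySem.List.slice_to s (by positivity)]; simp
  have hslice2 : PySem.List.slice s (some ((i : Int) + 1)) none = s.drop (i + 1) := by
    rw [PySem.List.slice_some_none]
    have : ((i : Int) + 1) = ((i + 1 : Nat) : Int) := by push_cast; ring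
    rw [this, PySem.List.clampIdx_natCast, pvDrop_min]
  rw [hslice1, hslice2, pvJoin_eq_pvCat]
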